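-- pv_equiv track=rewrite | github.com/Retro0106/LeetCode | array/four-divisors.py | sumFourDivisors
-- ===== SOURCE A (Python) =====
-- from typing import List
--
-- def sumFourDivisors(nums: List[int]) -> int:
--     def compute(num):
--         curr = 0
--         summ = 1 + num
--         i = 2
--         right = num
--         while i < right:
--             if num % i == 0:
--                 curr += 1
--                 right = num // i
--                 if i == right:
--                     return (0,-1)
--                 summ += i + right
--             i += 1
--         return (summ, curr)
--     total = 0
--     for num in nums:
--         current, number = compute(num)
--         if number == 1:
--             total += current
--     return total
-- ===== SOURCE B (Python) =====
-- from typing import List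
--
-- def _is_prime(n):
--     i = 2
--     while i * i <= n:
--         if n % i == 0:
--             return False
--         i += 1
--     return n >= 2
--
-- def sumFourDivisors(nums: List[int]) -> int:
--     # n has exactly four divisors iff n = p**3 (p prime) or n = p*q (p < q primes).
--     # Find the smallest factor p, classify, and use the closed-form divisor sums
--     # 1+p+p^2+p^3 resp. (1+p)*(1+q) instead of enumerating and summing divisors.
--     total = 0
--     for num in nums:
--         p = 0
--         i = 2
--         while i * i <= num:
--             if num % i == 0:
--                 p = i
--                 break
--             i += 1
--         if p == 0:
--             continue  # num < 4, or prime: fewer than four divisors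
--         q = num // p
--         if q == p * p:
--             total += 1 + p + q + num       # num = p**3
--         elif q != p and _is_prime(q):
--             total += (1 + p) * (1 + q)     # num = p*q, distinct primes
--     return total
-- ===== Notes on version B (the rewrite author's own statement) =====
-- stated objective: faster
-- what changed: A scans candidate divisors per number up to a shrinking cofactor bound, accumulating divisor pairs and their sum (O(num) for primes); B instead uses the classification 'exactly four divisors iff num = p^3 or num = p*q with p < q primes': it finds the smallest factor p (stopping at the first hit), tests the cofactor for primality, and adds the closed-form divisor sum 1+p+p^2+p^3 or (1+p)*(1+q).
import Mathlib
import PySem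

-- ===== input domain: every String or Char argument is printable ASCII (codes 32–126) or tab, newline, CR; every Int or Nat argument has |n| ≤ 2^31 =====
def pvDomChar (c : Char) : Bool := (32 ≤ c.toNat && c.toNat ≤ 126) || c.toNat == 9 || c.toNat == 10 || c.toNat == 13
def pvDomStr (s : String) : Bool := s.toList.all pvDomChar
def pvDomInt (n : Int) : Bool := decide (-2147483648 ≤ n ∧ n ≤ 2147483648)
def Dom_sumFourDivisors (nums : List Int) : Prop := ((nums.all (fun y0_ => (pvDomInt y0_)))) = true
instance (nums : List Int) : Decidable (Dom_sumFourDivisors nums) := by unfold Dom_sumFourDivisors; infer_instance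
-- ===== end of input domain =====

-- B replaces A's per-number divisor-pair scan by the classification "exactly four
-- divisors iff n = p^3 or n = p*q, distinct primes": smallest factor + primality
-- test + closed-form divisor sums.

-- ===== PORT A =====
-- A's inner while-loop; fuel = num.toNat never runs out on the top-level call
-- (i starts at 2 and the loop needs i < right ≤ num).
def computeALoop (num : Int) : Nat → Int → Int → Int → Int → Int × Int
  | 0, _, _, summ, curr => (summ, curr)
  | fuel+1, i, right, summ, curr =>
    if i < right then
      if PySem.Int.mod num i = 0 then
        let right' := PySem.Int.floordiv num i
        if i = right' then (0, -1)
        else computeALoop num fuel (i+1) right' (summ + i + right') (curr + 1)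
      else computeALoop num fuel (i+1) right summ curr
    else (summ, curr)

def computeA (num : Int) : Int × Int :=
  computeALoop num num.toNat 2 num (1 + num) 0

def sumFourDivisors (nums : List Int) : Int :=
  nums.foldl (fun total num =>
    let r := computeA num
    if r.2 = 1 then total + r.1 else total) 0

-- ===== PORT B =====
-- _is_prime's while-loop; fuel = n.toNat never runs out on the top-level call
def isPrimeLoop (n : Int) : Nat → Int → Bool
  | 0, _ => decide (2 ≤ n)
  | fuel+1, i =>
    if i * i ≤ n then
      if PySem.Int.mod n i = 0 then false
      else isPrimeLoop n fuel (i+1)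
    else decide (2 ≤ n)

def isPrimeB (n : Int) : Bool := isPrimeLoop n n.toNat 2

-- the smallest-factor search (the while-loop with break); fuel = num.toNat
def findFacLoop (num : Int) : Nat → Int → Int
  | 0, _ => 0
  | fuel+1, i =>
    if i * i ≤ num then
      if PySem.Int.mod num i = 0 then i
      else findFacLoop num fuel (i+1)
    else 0

def findFacB (num : Int) : Int := findFacLoop num num.toNat 2

def sumFourDivisors_alt (nums : List Int) : Int :=
  nums.foldl (fun total num =>
    let p := findFacB num
    if p = 0 then total
    else
      let q := PySem.Int.floordiv num p
      if q = p * p then total + (1 + p + q + num)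
      else if q ≠ p ∧ isPrimeB q = true then total + (1 + p) * (1 + q)
      else total) 0

-- ===== PRECONDITION & SPEC =====
def Spec_sumFourDivisors (nums : List Int) (out : Int) : Prop := out = sumFourDivisors_alt nums
instance (nums : List Int) (out : Int) : Decidable (Spec_sumFourDivisors nums out) := by unfold Spec_sumFourDivisors; infer_instance

-- ===== CLAIM (what is proved, stated in full; the proofs are below) =====
def Claim_equal_sumFourDivisors : Prop := ∀ (nums : List Int), Dom_sumFourDivisors nums → Spec_sumFourDivisors nums (sumFourDivisors nums)

-- ===== LEMMAS AND PROOFS =====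

-- the canonical per-number step both programs compute
def goodStep (total num : Int) : Int :=
  if 1 ≤ num ∧ (num.toNat.divisors.card : Int) = 4
  then total + num.toNat.divisors.sum (fun e => (e : Int)) else total

-- Small divisors (d*d < n) of n that A's loop, standing at index j, has not yet found.
def remA (n j : ℕ) : Finset ℕ := n.divisors.filter (fun d => j ≤ d ∧ d * d < n)
-- Small / square divisors of n.
def divL (n : ℕ) : Finset ℕ := n.divisors.filter (fun d => d * d < n)
def divE (n : ℕ) : Finset ℕ := n.divisors.filter (fun d => d * d = n)
def divG (n : ℕ) : Finset ℕ := n.divisors.filter (fun d => n < d * d)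

lemma mem_remA (n j d : ℕ) : d ∈ remA n j ↔ d ∣ n ∧ n ≠ 0 ∧ j ≤ d ∧ d * d < n := by
  simp [remA, Nat.mem_divisors, and_assoc]

lemma div_lt_div_of_dvd_lt (n d k : ℕ) (hn0 : 0 < n) (hd : d ∣ n) (hk : k ∣ n) (h : d < k) :
    n / k < n / d := by
  have h1 := Nat.div_mul_cancel hd
  have h2 := Nat.div_mul_cancel hk
  have hq1 : 0 < n / d := Nat.div_pos (Nat.le_of_dvd hn0 hd) (Nat.pos_of_dvd_of_pos hd hn0)
  by_contra hc
  push Not at hc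
  nlinarith

lemma sqrt_eq_of_sq (k n : ℕ) (h : k * k = n) : Nat.sqrt n = k := by
  rw [← h, ← Nat.pow_two]; exact Nat.sqrt_eq' k

lemma lt_div_self_of_sq_lt (n d : ℕ) (hd : d ∣ n) (h : d * d < n) : d < n / d := by
  rcases Nat.eq_zero_or_pos d with rfl | hp
  · obtain rfl := Nat.eq_zero_of_zero_dvd hd; omega
  · exact (Nat.lt_div_iff_mul_lt' hd d).mpr h

lemma remA_step_dvd (n j : ℕ) (hn0 : n ≠ 0) (hj : j ∣ n) (hjj : j * j < n) :
    remA n j = insert j (remA n (j+1)) ∧ j ∉ remA n (j+1) := by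
  constructor
  · ext e
    simp only [mem_remA, Finset.mem_insert]
    constructor
    · rintro ⟨he, -, h1, h2⟩
      by_cases h : e = j
      · exact Or.inl h
      · exact Or.inr ⟨he, hn0, by omega, h2⟩
    · rintro (rfl | ⟨he, -, h1, h2⟩)
      · exact ⟨hj, hn0, le_refl _, hjj⟩
      · exact ⟨he, hn0, by omega, h2⟩
  · simp only [mem_remA]
    rintro ⟨-, -, h1, -⟩
    omega

lemma remA_step_nondvd (n j : ℕ) (hj : ¬ j ∣ n) : remA n j = remA n (j+1) := by
  ext e
  simp only [mem_remA]
  constructor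
  · rintro ⟨he, hn0, h1, h2⟩
    have : e ≠ j := fun h => hj (h ▸ he)
    exact ⟨he, hn0, by omega, h2⟩
  · rintro ⟨he, hn0, h1, h2⟩
    exact ⟨he, hn0, by omega, h2⟩

-- facts available when A's loop exits without having hit a square root
lemma A_exit (n j d : ℕ) (hn : 2 ≤ n) (hd : d ∣ n) (hdd : d * d < n)
    (hsq : ∀ k, k ∣ n → k * k = n → j ≤ k) (he : n / d ≤ j) :
    remA n j = ∅ ∧ Nat.sqrt n * Nat.sqrt n ≠ n := by
  have hn0 : 0 < n := by omega
  constructor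
  · ext e
    simp only [mem_remA, Finset.notMem_empty, iff_false]
    rintro ⟨he', -, hje, hee⟩
    have h1 : e < n / e := lt_div_self_of_sq_lt n e he' hee
    have h2 : d < n / d := lt_div_self_of_sq_lt n d hd hdd
    have h4 : n / e < n / d := div_lt_div_of_dvd_lt n d e hn0 hd he' (by omega)
    omega
  · intro hS
    have hk : Nat.sqrt n ∣ n := Dvd.intro (Nat.sqrt n) hS
    have hjk := hsq (Nat.sqrt n) hk hS
    have hdk : d < Nat.sqrt n := Nat.mul_self_lt_mul_self_iff.mp (by omega)
    have h4 : n / Nat.sqrt n < n / d := div_lt_div_of_dvd_lt n d (Nat.sqrt n) hn0 hd hk hdk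
    have hnk : n / Nat.sqrt n = Nat.sqrt n := by
      have h5 := Nat.mul_div_left (Nat.sqrt n) (Nat.sqrt_pos.mpr hn0)
      rw [hS] at h5
      exact h5
    omega

lemma computeALoop_spec (n : ℕ) (hn : 2 ≤ n) :
  ∀ (fuel j d : ℕ) (summ curr : Int),
    2 ≤ j → d ∣ n → 1 ≤ d → d * d < n → d < j →
    (∀ e, e ∣ n → 2 ≤ e → e < j → e ≤ d) →
    (∀ k, k ∣ n → k * k = n → j ≤ k) →
    n + 1 ≤ fuel + j →
    computeALoop (n : Int) fuel (j : Int) ((n / d : ℕ) : Int) summ curr =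
      if Nat.sqrt n * Nat.sqrt n = n then (0, -1)
      else (summ + (remA n j).sum (fun e => (e : Int) + ((n / e : ℕ) : Int)),
            curr + (remA n j).card) := by
  intro fuel
  induction fuel with
  | zero =>
    intro j d summ curr h2j hd hd1 hdd hdj hmax hsq hf
    obtain ⟨hA, hS⟩ := A_exit n j d hn hd hdd hsq (le_trans (Nat.div_le_self n d) (by omega))
    simp only [computeALoop]
    rw [if_neg hS, hA]
    simp
  | succ f ih =>
    intro j d summ curr h2j hd hd1 hdd hdj hmax hsq hf
    have hn0 : 0 < n := by omega
    have hnd_le : n / d ≤ n := Nat.div_le_self n d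
    have hcast : ((j : Int) + 1) = ((j + 1 : ℕ) : Int) := by push_cast; ring
    by_cases hguard : j < n / d
    · have hg' : (j : Int) < ((n / d : ℕ) : Int) := by exact_mod_cast hguard
      have hjn : j < n := by omega
      by_cases hdvd : j ∣ n
      · have hmod : PySem.Int.mod (n : Int) (j : Int) = 0 := by
          rw [PySem.Int.mod_natCast, Nat.dvd_iff_mod_eq_zero.mp hdvd]
          rfl
        have hfd : PySem.Int.floordiv (n : Int) (j : Int) = ((n / j : ℕ) : Int) :=
          PySem.Int.floordiv_natCast n j
        by_cases hq : n / j = j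
        · -- square root hit: A aborts with (0, -1)
          have hnsq : j * j = n := by
            have h := Nat.div_mul_cancel hdvd
            rw [hq] at h
            exact h
          have hS : Nat.sqrt n * Nat.sqrt n = n := by
            rw [sqrt_eq_of_sq j n hnsq]; exact hnsq
          simp only [computeALoop, if_pos hg', hmod, hfd, if_true]
          rw [if_pos (show (j : Int) = ((n / j : ℕ) : Int) by exact_mod_cast hq.symm),
              if_pos hS]
        · -- a new small divisor j
          have hjq : j < n / j := by
            rcases Nat.lt_trichotomy (n / j) j with hlt | heq | hgt
            · exfalso
              by_cases h1 : n / j ≤ 1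
              · have hpos : 0 < n / j := Nat.div_pos (Nat.le_of_dvd hn0 hdvd) (by omega)
                have hone : n / j = 1 := by omega
                have h := Nat.div_mul_cancel hdvd
                rw [hone, one_mul] at h
                omega
              · have hle := hmax (n / j) (Nat.div_dvd_of_dvd hdvd) (by omega) hlt
                have hx : n / d ≤ n / (n / j) := Nat.div_le_div_left hle (by omega)
                rw [Nat.div_div_self hdvd (by omega)] at hx
                omega
            · exact absurd heq hq
            · exact hgt
          have hjj : j * j < n := (Nat.lt_div_iff_mul_lt' hdvd j).mp hjq
          obtain ⟨hset, hnm⟩ := remA_step_dvd n j (by omega) hdvd hjj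
          have hstep : computeALoop (n : Int) (f+1) (j : Int) ((n / d : ℕ) : Int) summ curr
              = computeALoop (n : Int) f ((j+1 : ℕ) : Int) ((n / j : ℕ) : Int)
                  (summ + (j : Int) + ((n / j : ℕ) : Int)) (curr + 1) := by
            simp only [computeALoop, if_pos hg', hmod, hfd, if_true]
            rw [if_neg (show ¬ ((j : Int) = ((n / j : ℕ) : Int)) from
                  fun h => hq (by exact_mod_cast h.symm)), hcast]
          rw [hstep, ih (j+1) j _ _ (by omega) hdvd (by omega) hjj (by omega)
                (fun e _ _ h => by omega)
                (fun k hk hkk => by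
                  have h1 := hsq k hk hkk
                  have h2 : k ≠ j := fun h => hq (by
                    subst h
                    rw [← hkk]
                    exact Nat.mul_div_left k (by omega))
                  omega)
                (by omega)]
          rw [hset]
          split_ifs with h
          · rfl
          · rw [Finset.sum_insert hnm, Finset.card_insert_of_notMem hnm]
            simp only [Prod.mk.injEq]
            constructor <;> push_cast <;> ring
      · have hmod : ¬ (PySem.Int.mod (n : Int) (j : Int) = 0) := by
          rw [PySem.Int.mod_natCast]
          exact_mod_cast fun h =>
            hdvd (Nat.dvd_iff_mod_eq_zero.mpr (by exact_mod_cast h))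
        have hstep : computeALoop (n : Int) (f+1) (j : Int) ((n / d : ℕ) : Int) summ curr
            = computeALoop (n : Int) f ((j+1 : ℕ) : Int) ((n / d : ℕ) : Int) summ curr := by
          simp only [computeALoop, if_pos hg', if_neg hmod]
          rw [hcast]
        rw [hstep, ih (j+1) d summ curr (by omega) hd hd1 hdd (by omega)
              (fun e he h2e hlt => by
                rcases Nat.lt_or_ge e j with h | h
                · exact hmax e he h2e h
                · exact absurd he (by
                    have : e = j := by omega
                    rw [this]; exact hdvd))
              (fun k hk hkk => by
                have h1 := hsq k hk hkk
                have h2 : k ≠ j := fun h => hdvd (h ▸ hk)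
                omega)
              (by omega),
            remA_step_nondvd n j hdvd]
    · have hg' : ¬ ((j : Int) < ((n / d : ℕ) : Int)) := by exact_mod_cast hguard
      obtain ⟨hA, hS⟩ := A_exit n j d hn hd hdd hsq (by omega)
      simp only [computeALoop, if_neg hg']
      rw [if_neg hS, hA]
      simp

lemma mem_divL (n d : ℕ) : d ∈ divL n ↔ d ∣ n ∧ n ≠ 0 ∧ d * d < n := by
  simp [divL, Nat.mem_divisors, and_assoc]

lemma mem_divE (n d : ℕ) : d ∈ divE n ↔ d ∣ n ∧ n ≠ 0 ∧ d * d = n := by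
  simp [divE, Nat.mem_divisors, and_assoc]

lemma mem_divG (n d : ℕ) : d ∈ divG n ↔ d ∣ n ∧ n ≠ 0 ∧ n < d * d := by
  simp [divG, Nat.mem_divisors, and_assoc]

lemma pair_L_to_G (n d : ℕ) (h : d ∈ divL n) : n / d ∈ divG n := by
  rw [mem_divL] at h
  obtain ⟨hd, hn0, hdd⟩ := h
  have hdpos : 0 < d := Nat.pos_of_dvd_of_pos hd (by omega)
  have hqpos : 0 < n / d := Nat.div_pos (Nat.le_of_dvd (by omega) hd) hdpos
  have he : n / d * d = n := Nat.div_mul_cancel hd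
  have hlt : d < n / d := lt_div_self_of_sq_lt n d hd hdd
  rw [mem_divG]
  exact ⟨Nat.div_dvd_of_dvd hd, hn0, by nlinarith⟩

lemma pair_G_to_L (n d : ℕ) (h : d ∈ divG n) : n / d ∈ divL n := by
  rw [mem_divG] at h
  obtain ⟨hd, hn0, hdd⟩ := h
  have hdpos : 0 < d := Nat.pos_of_dvd_of_pos hd (by omega)
  have hqpos : 0 < n / d := Nat.div_pos (Nat.le_of_dvd (by omega) hd) hdpos
  have he : n / d * d = n := Nat.div_mul_cancel hd
  have hlt : n / d < d := by nlinarith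
  rw [mem_divL]
  exact ⟨Nat.div_dvd_of_dvd hd, hn0, by nlinarith⟩

lemma pair_inv (n d : ℕ) (hd : d ∣ n) (hn0 : n ≠ 0) : n / (n / d) = d :=
  Nat.div_div_self hd hn0

lemma card_LG (n : ℕ) : (divL n).card = (divG n).card := by
  apply Finset.card_nbij' (fun d => n / d) (fun d => n / d)
  · intro d hd
    exact Finset.mem_coe.mpr (pair_L_to_G n d (Finset.mem_coe.mp hd))
  · intro d hd
    exact Finset.mem_coe.mpr (pair_G_to_L n d (Finset.mem_coe.mp hd))
  · intro d hd
    have h := (mem_divL n d).mp (Finset.mem_coe.mp hd)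
    exact pair_inv n d h.1 h.2.1
  · intro d hd
    have h := (mem_divG n d).mp (Finset.mem_coe.mp hd)
    exact pair_inv n d h.1 h.2.1

lemma sum_G_eq (n : ℕ) :
    (divG n).sum (fun d => (d : Int)) = (divL n).sum (fun d => ((n / d : ℕ) : Int)) := by
  apply Finset.sum_nbij' (fun d => n / d) (fun d => n / d)
  · intro d hd
    exact pair_G_to_L n d hd
  · intro d hd
    exact pair_L_to_G n d hd
  · intro d hd
    have h := (mem_divG n d).mp hd
    exact pair_inv n d h.1 h.2.1
  · intro d hd
    have h := (mem_divL n d).mp hd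
    exact pair_inv n d h.1 h.2.1
  · intro d hd
    have h := (mem_divG n d).mp hd
    rw [pair_inv n d h.1 h.2.1]

lemma divisors_partition (n : ℕ) :
    n.divisors = divL n ∪ divE n ∪ divG n := by
  ext d
  simp only [Finset.mem_union, mem_divL, mem_divE, mem_divG, Nat.mem_divisors]
  constructor
  · rintro ⟨hd, hn0⟩
    rcases Nat.lt_trichotomy (d * d) n with h | h | h
    · exact Or.inl (Or.inl ⟨hd, hn0, h⟩)
    · exact Or.inl (Or.inr ⟨hd, hn0, h⟩)
    · exact Or.inr ⟨hd, hn0, h⟩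
  · rintro ((⟨hd, hn0, -⟩ | ⟨hd, hn0, -⟩) | ⟨hd, hn0, -⟩) <;> exact ⟨hd, hn0⟩

lemma disj_LE (n : ℕ) : Disjoint (divL n) (divE n) := by
  rw [Finset.disjoint_left]
  intro d h1 h2
  rw [mem_divL] at h1
  rw [mem_divE] at h2
  omega

lemma disj_LEG (n : ℕ) : Disjoint (divL n ∪ divE n) (divG n) := by
  rw [Finset.disjoint_left]
  intro d h1 h2
  rw [Finset.mem_union, mem_divL, mem_divE] at h1
  rw [mem_divG] at h2
  rcases h1 with h1 | h1 <;> omega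

lemma card_divisors_split (n : ℕ) :
    n.divisors.card = 2 * (divL n).card + (divE n).card := by
  rw [divisors_partition n, Finset.card_union_of_disjoint (disj_LEG n),
      Finset.card_union_of_disjoint (disj_LE n)]
  have := card_LG n
  omega

lemma sum_divisors_split (n : ℕ) :
    n.divisors.sum (fun d => (d : Int))
      = (divL n).sum (fun d => (d : Int) + ((n / d : ℕ) : Int))
        + (divE n).sum (fun d => (d : Int)) := by
  rw [divisors_partition n, Finset.sum_union (disj_LEG n), Finset.sum_union (disj_LE n),
      sum_G_eq n, Finset.sum_add_distrib]
  ring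

lemma divE_of_sq (n : ℕ) (hn : 2 ≤ n) (h : Nat.sqrt n * Nat.sqrt n = n) :
    divE n = {Nat.sqrt n} := by
  ext d
  simp only [mem_divE, Finset.mem_singleton]
  constructor
  · rintro ⟨hd, -, hdd⟩
    rw [← sqrt_eq_of_sq d n hdd]
  · rintro rfl
    exact ⟨Dvd.intro _ h, by omega, h⟩

lemma divE_of_nonsq (n : ℕ) (h : ¬ Nat.sqrt n * Nat.sqrt n = n) : divE n = ∅ := by
  ext d
  simp only [mem_divE, Finset.notMem_empty, iff_false]
  rintro ⟨-, -, hdd⟩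
  exact h (by rw [sqrt_eq_of_sq d n hdd]; exact hdd)

lemma divL_eq_insert (n : ℕ) (hn : 2 ≤ n) :
    divL n = insert 1 (remA n 2) ∧ 1 ∉ remA n 2 := by
  constructor
  · ext d
    simp only [mem_divL, mem_remA, Finset.mem_insert]
    constructor
    · rintro ⟨hd, hn0, hdd⟩
      have : 0 < d := Nat.pos_of_dvd_of_pos hd (by omega)
      by_cases h1 : d = 1
      · exact Or.inl h1
      · exact Or.inr ⟨hd, hn0, by omega, hdd⟩
    · rintro (rfl | ⟨hd, hn0, -, hdd⟩)
      · exact ⟨one_dvd n, by omega, by omega⟩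
      · exact ⟨hd, hn0, hdd⟩
  · simp only [mem_remA]
    rintro ⟨-, -, h, -⟩
    omega

-- A's per-number step equals the canonical step.
lemma stepA_eq (total num : Int) :
    (let r := computeA num; if r.2 = 1 then total + r.1 else total) = goodStep total num := by
  by_cases h0 : num ≤ 0
  · have hA : computeA num = (1 + num, 0) := by
      unfold computeA
      rw [Int.toNat_of_nonpos h0]
      rfl
    simp only [hA, goodStep]
    rw [if_neg (by norm_num), if_neg (fun h => absurd h.1 (by omega))]
  · by_cases hone : num = 1
    · subst hone
      norm_num [goodStep, computeA, computeALoop, Nat.divisors_one]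
    · -- num ≥ 2
      have hnum : ((num.toNat : ℕ) : Int) = num := by omega
      set n := num.toNat with hdefn
      have hn2 : 2 ≤ n := by omega
      have hn0 : 0 < n := by omega
      -- A's inner loop, characterised
      have hA : computeA num
          = (if Nat.sqrt n * Nat.sqrt n = n then ((0 : Int), (-1 : Int))
             else (1 + (n : Int) + (remA n 2).sum (fun e => (e : Int) + ((n / e : ℕ) : Int)),
                   ((remA n 2).card : Int))) := by
        have hmax : ∀ e, e ∣ n → 2 ≤ e → e < 2 → e ≤ 1 := fun e _ h2 hl => by omega
        have hsq : ∀ k, k ∣ n → k * k = n → 2 ≤ k := by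
          intro k _ hkk
          by_contra hc
          have hk1 : k ≤ 1 := by omega
          have : k * k ≤ 1 * 1 := Nat.mul_le_mul hk1 hk1
          omega
        have h := computeALoop_spec n hn2 n 2 1 (1 + (n : Int)) 0 (le_refl 2)
          (one_dvd n) (le_refl 1) (by omega) (by omega) hmax hsq (by omega)
        rw [Nat.div_one] at h
        unfold computeA
        rw [← hnum]
        rw [Int.toNat_natCast]
        convert h using 2
        push_cast
        ring_nf
      rw [hA]
      simp only [goodStep]
      by_cases hS : Nat.sqrt n * Nat.sqrt n = n
      · -- square: A aborts; divisor count is odd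
        rw [if_pos hS]
        have hcard := card_divisors_split n
        rw [divE_of_sq n hn2 hS, Finset.card_singleton] at hcard
        have hne : ¬ (1 ≤ num ∧ ((n.divisors.card : ℕ) : Int) = 4) := by
          rintro ⟨-, h⟩
          have : n.divisors.card = 4 := by exact_mod_cast h
          omega
        rw [if_neg hne]
        norm_num
      · rw [if_neg hS]
        obtain ⟨hLins, hnm⟩ := divL_eq_insert n hn2
        have hcard := card_divisors_split n
        rw [divE_of_nonsq n hS, Finset.card_empty,
            hLins, Finset.card_insert_of_notMem hnm] at hcard
        have hsum := sum_divisors_split n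
        rw [divE_of_nonsq n hS, Finset.sum_empty, hLins, Finset.sum_insert hnm,
            Nat.div_one, add_zero] at hsum
        simp only []
        by_cases hc : (remA n 2).card = 1
        · rw [if_pos (show ((remA n 2).card : Int) = 1 by exact_mod_cast hc),
              if_pos (show 1 ≤ num ∧ ((n.divisors.card : ℕ) : Int) = 4 from
                ⟨by omega, by exact_mod_cast (by omega : n.divisors.card = 4)⟩)]
          rw [hsum]
          push_cast
          ring
        · rw [if_neg (show ¬ ((remA n 2).card : Int) = 1 from
                fun h => hc (by exact_mod_cast h)),
              if_neg (show ¬ (1 ≤ num ∧ ((n.divisors.card : ℕ) : Int) = 4) from by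
                rintro ⟨-, h⟩
                have : n.divisors.card = 4 := by exact_mod_cast h
                omega)]

-- ===== B-side lemmas =====

-- the smallest-factor loop either certifies "no divisor e with e*e ≤ n" or finds the least one
lemma findFacLoop_spec (n : ℕ) :
  ∀ (fuel j : ℕ), 2 ≤ j → n + 1 ≤ fuel + j →
    (∀ e, 2 ≤ e → e < j → ¬ (e ∣ n ∧ e*e ≤ n)) →
    (findFacLoop (n : Int) fuel (j : Int) = 0 ∧ (∀ e, 2 ≤ e → e*e ≤ n → ¬ e ∣ n))
    ∨ (∃ r : ℕ, findFacLoop (n : Int) fuel (j : Int) = (r : Int) ∧ 2 ≤ r ∧ r ∣ n ∧ r*r ≤ n ∧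
         (∀ e, 2 ≤ e → e < r → ¬ (e ∣ n ∧ e*e ≤ n))) := by
  intro fuel
  induction fuel with
  | zero =>
    intro j hj hf hinv
    left
    refine ⟨rfl, fun e h2 hee hdvd => ?_⟩
    by_cases hlt : e < j
    · exact hinv e h2 hlt ⟨hdvd, hee⟩
    · nlinarith
  | succ f ih =>
    intro j hj hf hinv
    by_cases hg : j * j ≤ n
    · have hg' : (j : Int) * (j : Int) ≤ (n : Int) := by exact_mod_cast hg
      by_cases hdvd : j ∣ n
      · have hmod : PySem.Int.mod (n : Int) (j : Int) = 0 := by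
          rw [PySem.Int.mod_natCast, Nat.dvd_iff_mod_eq_zero.mp hdvd]
          rfl
        right
        refine ⟨j, ?_, hj, hdvd, hg, fun e h2 hlt => hinv e h2 hlt⟩
        simp [findFacLoop, hg', hmod]
      · have hmod : ¬ (PySem.Int.mod (n : Int) (j : Int) = 0) := by
          rw [PySem.Int.mod_natCast]
          exact_mod_cast fun h =>
            hdvd (Nat.dvd_iff_mod_eq_zero.mpr (by exact_mod_cast h))
        have hstep : findFacLoop (n : Int) (f+1) (j : Int) = findFacLoop (n : Int) f ((j+1 : ℕ) : Int) := by
          simp only [findFacLoop, if_pos hg', if_neg hmod]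
          norm_num
        rw [hstep]
        exact ih (j+1) (by omega) (by omega)
          (fun e h2 hlt hc => by
            rcases Nat.lt_or_ge e j with h | h
            · exact hinv e h2 h hc
            · have : e = j := by omega
              exact hdvd (this ▸ hc.1))
    · have hg' : ¬ ((j : Int) * (j : Int) ≤ (n : Int)) := by exact_mod_cast hg
      left
      constructor
      · simp [findFacLoop, hg']
      · intro e h2 hee hdvd
        by_cases hlt : e < j
        · exact hinv e h2 hlt ⟨hdvd, hee⟩
        · nlinarith

-- the primality loop decides "2 ≤ n and no divisor e with e*e ≤ n"
lemma isPrimeLoop_spec (n : ℕ) :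
  ∀ (fuel j : ℕ), 2 ≤ j → n + 1 ≤ fuel + j →
    (∀ e, 2 ≤ e → e < j → ¬ (e ∣ n ∧ e*e ≤ n)) →
    (isPrimeLoop (n : Int) fuel (j : Int) = true ↔ (2 ≤ n ∧ ∀ e, 2 ≤ e → e*e ≤ n → ¬ e ∣ n)) := by
  intro fuel
  induction fuel with
  | zero =>
    intro j hj hf hinv
    simp only [isPrimeLoop, decide_eq_true_eq]
    constructor
    · intro h2
      refine ⟨by exact_mod_cast h2, fun e he hee hdvd => ?_⟩
      by_cases hlt : e < j
      · exact hinv e he hlt ⟨hdvd, hee⟩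
      · nlinarith
    · rintro ⟨h2, -⟩
      exact_mod_cast h2
  | succ f ih =>
    intro j hj hf hinv
    by_cases hg : j * j ≤ n
    · have hg' : (j : Int) * (j : Int) ≤ (n : Int) := by exact_mod_cast hg
      by_cases hdvd : j ∣ n
      · have hmod : PySem.Int.mod (n : Int) (j : Int) = 0 := by
          rw [PySem.Int.mod_natCast, Nat.dvd_iff_mod_eq_zero.mp hdvd]
          rfl
        have : isPrimeLoop (n : Int) (f+1) (j : Int) = false := by
          simp [isPrimeLoop, hg', hmod]
        rw [this]
        simp only [Bool.false_eq_true, false_iff]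
        rintro ⟨-, hall⟩
        exact hall j hj hg hdvd
      · have hmod : ¬ (PySem.Int.mod (n : Int) (j : Int) = 0) := by
          rw [PySem.Int.mod_natCast]
          exact_mod_cast fun h =>
            hdvd (Nat.dvd_iff_mod_eq_zero.mpr (by exact_mod_cast h))
        have hstep : isPrimeLoop (n : Int) (f+1) (j : Int) = isPrimeLoop (n : Int) f ((j+1 : ℕ) : Int) := by
          simp only [isPrimeLoop, if_pos hg', if_neg hmod]
          norm_num
        rw [hstep]
        exact ih (j+1) (by omega) (by omega)
          (fun e h2 hlt hc => by
            rcases Nat.lt_or_ge e j with h | h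
            · exact hinv e h2 h hc
            · have : e = j := by omega
              exact hdvd (this ▸ hc.1))
    · have hg' : ¬ ((j : Int) * (j : Int) ≤ (n : Int)) := by exact_mod_cast hg
      have : isPrimeLoop (n : Int) (f+1) (j : Int) = decide (2 ≤ (n : Int)) := by
        simp [isPrimeLoop, hg']
      rw [this]
      simp only [decide_eq_true_eq]
      constructor
      · intro h2
        refine ⟨by exact_mod_cast h2, fun e he hee hdvd => ?_⟩
        by_cases hlt : e < j
        · exact hinv e he hlt ⟨hdvd, hee⟩
        · nlinarith
      · rintro ⟨h2, -⟩
        exact_mod_cast h2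

lemma no_small_divisor_prime (n : ℕ) (hn : 2 ≤ n)
    (h : ∀ e, 2 ≤ e → e*e ≤ n → ¬ e ∣ n) : n.Prime := by
  rw [Nat.prime_def_le_sqrt]
  exact ⟨hn, fun m h2 hle => h m h2 (by
    have := Nat.sqrt_le_sqrt (Nat.le_refl n)
    nlinarith [Nat.sqrt_le' n, Nat.le_sqrt.mp hle, Nat.sqrt_le n])⟩

lemma isPrimeB_iff (q : ℕ) : (isPrimeB (q : Int) = true) ↔ q.Prime := by
  have hspec := isPrimeLoop_spec q q 2 (le_refl 2) (by omega)
    (fun e h2 hlt => by omega)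
  unfold isPrimeB
  rw [Int.toNat_natCast]
  constructor
  · intro h
    obtain ⟨h2, hall⟩ := hspec.mp h
    exact no_small_divisor_prime q h2 hall
  · intro hp
    refine hspec.mpr ⟨hp.two_le, fun e h2 hee hdvd => ?_⟩
    rcases (Nat.Prime.eq_one_or_self_of_dvd hp e hdvd) with h | h
    · omega
    · subst h
      nlinarith [hp.two_le]

-- for n ≥ 2, the search returns 0 exactly on primes, else the least prime factor
lemma findFacB_char (n : ℕ) (hn : 2 ≤ n) :
    (findFacB (n : Int) = 0 ∧ n.Prime) ∨
    (findFacB (n : Int) = (n.minFac : Int) ∧ n.minFac * n.minFac ≤ n ∧ ¬ n.Prime) := by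
  have hspec := findFacLoop_spec n n 2 (le_refl 2) (by omega)
    (fun e h2 hlt => by omega)
  unfold findFacB
  rw [Int.toNat_natCast]
  rcases hspec with ⟨h0, hall⟩ | ⟨r, hr, h2r, hdvd, hrr, hmin⟩
  · exact Or.inl ⟨h0, no_small_divisor_prime n hn hall⟩
  · right
    have hrn : r < n := by
      rcases Nat.lt_or_ge r n with h | h
      · exact h
      · exfalso
        have : r ≤ n := Nat.le_of_dvd (by omega) hdvd
        have : r = n := by omega
        subst this
        nlinarith
    have hnotp : ¬ n.Prime := fun hp => by
      rcases Nat.Prime.eq_one_or_self_of_dvd hp r hdvd with h | h <;> omega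
    have hmf : n.minFac = r := by
      have h1 : n.minFac ≤ r := Nat.minFac_le_of_dvd h2r hdvd
      have h2 : 2 ≤ n.minFac := (Nat.minFac_prime (by omega : n ≠ 1)).two_le
      rcases Nat.lt_or_ge n.minFac r with h | h
      · exact absurd ⟨Nat.minFac_dvd n, by nlinarith⟩ (hmin n.minFac h2 h)
      · omega
    rw [hmf]
    exact ⟨hr, hrr, hnotp⟩

-- divisor sets of the three relevant shapes
lemma divisors_prime_card (p : ℕ) (hp : p.Prime) : p.divisors.card = 2 := by
  rw [hp.divisors]
  rw [Finset.card_insert_of_notMem (by simp [hp.one_lt.ne])]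
  simp

lemma divisors_prime_sq (p : ℕ) (hp : p.Prime) : (p*p).divisors = {1, p, p*p} := by
  have h2 := hp.two_le
  ext d
  simp only [Nat.mem_divisors, Finset.mem_insert, Finset.mem_singleton]
  constructor
  · rintro ⟨hd, -⟩
    have := (Nat.dvd_prime_pow hp).mp (by rwa [pow_two] : d ∣ p^2)
    obtain ⟨i, hi, rfl⟩ := this
    interval_cases i
    · exact Or.inl (by norm_num)
    · exact Or.inr (Or.inl (by ring))
    · exact Or.inr (Or.inr (by ring))
  · rintro (h | h | h)
    · subst h; exact ⟨one_dvd _, by positivity⟩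
    · subst h; exact ⟨dvd_mul_right _ _, by positivity⟩
    · subst h; exact ⟨dvd_refl _, by positivity⟩

lemma divisors_prime_cube (p : ℕ) (hp : p.Prime) :
    (p*(p*p)).divisors = {1, p, p*p, p*(p*p)} := by
  have h2 := hp.two_le
  ext d
  simp only [Nat.mem_divisors, Finset.mem_insert, Finset.mem_singleton]
  constructor
  · rintro ⟨hd, -⟩
    have := (Nat.dvd_prime_pow hp).mp (show d ∣ p^3 by rw [show p^3 = p*(p*p) by ring]; exact hd)
    obtain ⟨i, hi, rfl⟩ := this
    interval_cases i
    · exact Or.inl (by norm_num)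
    · exact Or.inr (Or.inl (by ring))
    · exact Or.inr (Or.inr (Or.inl (by ring)))
    · exact Or.inr (Or.inr (Or.inr (by ring)))
  · rintro (h | h | h | h)
    · subst h; exact ⟨one_dvd _, by positivity⟩
    · subst h; exact ⟨dvd_mul_right _ _, by positivity⟩
    · subst h; exact ⟨dvd_mul_left _ _, by positivity⟩
    · subst h; exact ⟨dvd_refl _, by positivity⟩

lemma divisors_prime_mul (p q : ℕ) (hp : p.Prime) (hq : q.Prime) (hne : p ≠ q) :
    (p*q).divisors = {1, p, q, p*q} := by
  have hp2 := hp.two_le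
  have hq2 := hq.two_le
  ext d
  simp only [Nat.mem_divisors, Finset.mem_insert, Finset.mem_singleton]
  constructor
  · rintro ⟨hd, -⟩
    by_cases hpd : p ∣ d
    · obtain ⟨e, rfl⟩ := hpd
      have he : e ∣ q := (mul_dvd_mul_iff_left (by omega : p ≠ 0)).mp hd
      rcases (Nat.Prime.eq_one_or_self_of_dvd hq e he) with h | h
      · exact Or.inr (Or.inl (by rw [h, mul_one]))
      · exact Or.inr (Or.inr (Or.inr (by rw [h])))
    · have hcop : p.Coprime d := (Nat.Prime.coprime_iff_not_dvd hp).mpr hpd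
      have hdq : d ∣ q := (Nat.Coprime.dvd_of_dvd_mul_left (hcop.symm)) hd
      rcases (Nat.Prime.eq_one_or_self_of_dvd hq d hdq) with h | h
      · exact Or.inl h
      · exact Or.inr (Or.inr (Or.inl h))
  · rintro (h | h | h | h)
    · subst h; exact ⟨one_dvd _, by positivity⟩
    · subst h; exact ⟨dvd_mul_right _ _, by positivity⟩
    · subst h; exact ⟨dvd_mul_left _ _, by positivity⟩
    · subst h; exact ⟨dvd_refl _, by positivity⟩

lemma card_four_insert (a b c e : ℕ) (h1 : a ≠ b) (h2 : a ≠ c) (h3 : a ≠ e)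
    (h4 : b ≠ c) (h5 : b ≠ e) (h6 : c ≠ e) :
    ({a, b, c, e} : Finset ℕ).card = 4 := by
  rw [Finset.card_insert_of_notMem (by simp [h1, h2, h3]),
      Finset.card_insert_of_notMem (by simp [h4, h5]),
      Finset.card_insert_of_notMem (by simp [h6])]
  simp

lemma sum_four_insert (a b c e : ℕ) (h1 : a ≠ b) (h2 : a ≠ c) (h3 : a ≠ e)
    (h4 : b ≠ c) (h5 : b ≠ e) (h6 : c ≠ e) :
    ({a, b, c, e} : Finset ℕ).sum (fun d => (d : Int)) = (a : Int) + b + c + e := by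
  rw [Finset.sum_insert (by simp [h1, h2, h3]),
      Finset.sum_insert (by simp [h4, h5]),
      Finset.sum_insert (by simp [h6])]
  simp [add_assoc]

-- the skip case: p = minFac n, p*p ≤ n, q = n/p with q ≠ p*p, q ≠ p, q not prime
lemma card_ne_four (n p q : ℕ) (hn : 2 ≤ n) (hp : p.Prime) (hdvd : p ∣ n)
    (hmin : p = n.minFac) (hq : q = n / p) (hple : p*p ≤ n)
    (hq1 : q ≠ p*p) (hq2 : q ≠ p) (hq3 : ¬ q.Prime) :
    n.divisors.card ≠ 4 := by
  intro hcard
  have hp2 := hp.two_le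
  have hnq : n = p * q := by rw [hq, Nat.mul_div_cancel' hdvd]
  have hqge : p ≤ q := by
    by_contra h
    push Not at h
    nlinarith
  have hplt : p < q := by omega
  have hq2le : 2 ≤ q := by omega
  have hqn : q < n := by nlinarith
  have hsub : ({1, p, q, n} : Finset ℕ) ⊆ n.divisors := by
    intro d hd
    simp only [Finset.mem_insert, Finset.mem_singleton] at hd
    rcases hd with rfl | rfl | rfl | rfl
    · simp [Nat.mem_divisors]; omega
    · exact Nat.mem_divisors.mpr ⟨hdvd, by omega⟩
    · exact Nat.mem_divisors.mpr ⟨by rw [hnq]; exact Dvd.intro_left p rfl, by omega⟩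
    · exact Nat.mem_divisors.mpr ⟨dvd_refl _, by omega⟩
  have hc4 : ({1, p, q, n} : Finset ℕ).card = 4 :=
    card_four_insert 1 p q n (by omega) (by omega) (by omega) (by omega) (by omega) (by omega)
  have heq : ({1, p, q, n} : Finset ℕ) = n.divisors :=
    Finset.eq_of_subset_of_card_le hsub (by omega)
  -- q is composite: its least prime factor r and cofactor q/r both divide n
  have hr := Nat.minFac_prime (by omega : q ≠ 1)
  set r := q.minFac with hrdef
  have hrq : r ∣ q := Nat.minFac_dvd q
  have hrn : r ∈ n.divisors := Nat.mem_divisors.mpr ⟨hrq.trans ⟨p, by rw [hnq]; ring⟩, by omega⟩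
  rw [← heq] at hrn
  simp only [Finset.mem_insert, Finset.mem_singleton] at hrn
  have hrX : r = p := by
    rcases hrn with h | h | h | h
    · exact absurd h hr.one_lt.ne'
    · exact h
    · exact absurd (h ▸ hr) hq3
    · exfalso
      have : r ≤ q := Nat.le_of_dvd (by omega) hrq
      omega
  have hpq : p ∣ q := hrX ▸ hrq
  obtain ⟨s, hs⟩ := hpq
  have hsn : s ∈ n.divisors := Nat.mem_divisors.mpr
    ⟨⟨p*p, by rw [hnq, hs]; ring⟩, by omega⟩
  rw [← heq] at hsn
  simp only [Finset.mem_insert, Finset.mem_singleton] at hsn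
  rcases hsn with rfl | rfl | rfl | rfl
  · omega
  · exact hq1 (by rw [hs])
  · nlinarith
  · nlinarith

-- B's per-number step equals the canonical step.
lemma stepB_eq (total num : Int) :
    (let p := findFacB num
     if p = 0 then total
     else
       let q := PySem.Int.floordiv num p
       if q = p * p then total + (1 + p + q + num)
       else if q ≠ p ∧ isPrimeB q = true then total + (1 + p) * (1 + q)
       else total) = goodStep total num := by
  by_cases h0 : num ≤ 1
  · have hfz : findFacB num = 0 := by
      unfold findFacB
      rcases Nat.eq_zero_or_pos num.toNat with h | h
      · rw [h]; rfl
      · have h1 : num.toNat = 1 := by omega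
        rw [h1]
        simp only [findFacLoop]
        rw [if_neg (by omega)]
    simp only [hfz, goodStep]
    rw [if_pos trivial]
    by_cases h1 : 1 ≤ num
    · have : num = 1 := by omega
      subst this
      norm_num [Nat.divisors_one]
    · rw [if_neg (fun h => h1 h.1)]
  · -- num ≥ 2
    have hnum : ((num.toNat : ℕ) : Int) = num := by omega
    set n := num.toNat with hdefn
    have hn2 : 2 ≤ n := by omega
    rcases findFacB_char n hn2 with ⟨hfz, hprime⟩ | ⟨hfv, hple, hnotp⟩
    · rw [← hnum]
      simp only [hfz, goodStep, Int.toNat_natCast]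
      rw [if_pos trivial]
      rw [if_neg (by
        rintro ⟨-, h⟩
        have : n.divisors.card = 4 := by exact_mod_cast h
        rw [divisors_prime_card n hprime] at this
        omega)]
    · set p := n.minFac with hpdef
      have hp := Nat.minFac_prime (by omega : n ≠ 1)
      have hp2 := hp.two_le
      have hdvd : p ∣ n := Nat.minFac_dvd n
      set q := n / p with hqdef
      have hnq : n = p * q := by rw [hqdef, Nat.mul_div_cancel' hdvd]
      have hqge : p ≤ q := by
        by_contra h
        push Not at h
        nlinarith
      rw [← hnum]
      simp only [hfv]
      rw [if_neg (by exact_mod_cast hp.pos.ne')]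
      rw [show PySem.Int.floordiv ((n : ℕ) : Int) ((p : ℕ) : Int) = ((q : ℕ) : Int) from
        PySem.Int.floordiv_natCast n p]
      by_cases hb1 : q = p * p
      · -- n = p^3
        rw [if_pos (by exact_mod_cast hb1)]
        have hcube : n = p * (p * p) := by rw [hnq, hb1]
        have hdd : n.divisors = {1, p, p*p, n} := by
          rw [hcube, divisors_prime_cube p hp]
        have hcard : n.divisors.card = 4 := by
          rw [hdd]
          exact card_four_insert _ _ _ _ (by nlinarith) (by nlinarith) (by nlinarith)
            (by nlinarith) (by nlinarith) (by nlinarith)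
        have hsum : n.divisors.sum (fun d => (d : Int)) = 1 + (p : Int) + ((p*p : ℕ) : Int) + (n : Int) := by
          rw [hdd, sum_four_insert _ _ _ _ (by nlinarith) (by nlinarith) (by nlinarith)
            (by nlinarith) (by nlinarith) (by nlinarith)]
          try norm_num
        simp only [goodStep, Int.toNat_natCast]
        rw [if_pos ⟨by exact_mod_cast (by omega : 1 ≤ n), by exact_mod_cast hcard⟩, hsum]
        rw [show ((q : ℕ) : Int) = ((p*p : ℕ) : Int) by exact_mod_cast hb1]
      · rw [if_neg (by exact_mod_cast hb1)]
        by_cases hb2 : q ≠ p ∧ q.Prime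
        · -- n = p * q, distinct primes
          obtain ⟨hqp, hqprime⟩ := hb2
          rw [if_pos ⟨by exact_mod_cast hqp, (isPrimeB_iff q).mpr hqprime⟩]
          have hdd : n.divisors = {1, p, q, n} := by
            conv_lhs => rw [hnq]
            rw [divisors_prime_mul p q hp hqprime (fun h => hqp h.symm), ← hnq]
          have hq2 := hqprime.two_le
          have hplt : p < q := by omega
          have hqn : q < n := by nlinarith
          have hcard : n.divisors.card = 4 := by
            rw [hdd]
            exact card_four_insert _ _ _ _ (by omega) (by omega) (by omega)
              (by omega) (by omega) (by omega)
          have hsum : n.divisors.sum (fun d => (d : Int)) = 1 + (p : Int) + (q : Int) + (n : Int) := by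
            rw [hdd, sum_four_insert _ _ _ _ (by omega) (by omega) (by omega)
              (by omega) (by omega) (by omega)]
            try norm_num
          simp only [goodStep, Int.toNat_natCast]
          rw [if_pos ⟨by exact_mod_cast (by omega : 1 ≤ n), by exact_mod_cast hcard⟩, hsum]
          have : ((n : ℕ) : Int) = (p : Int) * (q : Int) := by exact_mod_cast hnq
          rw [this]
          ring
        · -- skip: show the divisor count is not 4
          rw [if_neg (by
            rintro ⟨hqp, hpr⟩
            exact hb2 ⟨by exact_mod_cast hqp, (isPrimeB_iff q).mp hpr⟩)]
          simp only [goodStep, Int.toNat_natCast]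
          rw [if_neg (by
            rintro ⟨-, hc⟩
            have hcard : n.divisors.card = 4 := by exact_mod_cast hc
            by_cases hqp : q = p
            · -- n = p^2, three divisors
              have hsq : n = p * p := by rw [hnq, hqp]
              rw [hsq, divisors_prime_sq p hp] at hcard
              rw [Finset.card_insert_of_notMem (by simp; constructor <;> nlinarith),
                  Finset.card_insert_of_notMem (by simp; nlinarith),
                  Finset.card_singleton] at hcard
              omega
            · have hq3 : ¬ q.Prime := fun h => hb2 ⟨hqp, h⟩
              exact card_ne_four n p q hn2 hp hdvd hpdef hqdef hple hb1 hqp hq3 hcard)]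


-- ===== VERDICT (by name: the statement is the Claim_ definition above) =====
theorem sumFourDivisors_spec : Claim_equal_sumFourDivisors := by
  intro nums _
  unfold Spec_sumFourDivisors sumFourDivisors sumFourDivisors_alt
  rw [PySem.List.foldl_congr_mem nums _ goodStep 0 (fun total num _ => stepA_eq total num),
      PySem.List.foldl_congr_mem nums _ goodStep 0 (fun total num _ => stepB_eq total num)]
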